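-- pv_equiv track=rewrite | github.com/motuskov/Python_lessons_basic | lesson04/home_work/hw04_normal.py | task_2_wo_re
-- ===== SOURCE A (Python) =====
-- def task_2_wo_re(text):
--     lowercase_letters = list(map(chr, range(ord('a'), ord('z') + 1)))
--     capital_letters = list(map(chr, range(ord('A'), ord('Z') + 1)))
--     result = []
--     prev_ch = ""
--     prev_prev_ch = ""
--     word = ""
--     for ch in text:
--         if ch in lowercase_letters:
--             if len(word) > 2:
--                 result.append(word[:-2])
--             word = ""
--         elif ch in capital_letters and \
--                 ((prev_ch in lowercase_letters and prev_prev_ch in lowercase_letters) or len(word) > 0):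
--             word += ch
--         prev_prev_ch = prev_ch
--         prev_ch = ch
--     if len(word) > 2:
--         result.append(word[:-2])
--     return result
-- ===== SOURCE B (Python) =====
-- def task_2_wo_re(text):
--     # Window scan: a capital preceded by two lowercase letters starts a run;
--     # the run collects capitals and skips other non-lowercase chars until a
--     # lowercase letter (or end of text) flushes it.
--     result = []
--     n = len(text)
--     i = 2
--     while i < n:
--         if ('a' <= text[i - 2] <= 'z' and 'a' <= text[i - 1] <= 'z'
--                 and 'A' <= text[i] <= 'Z'):
--             caps = []
--             j = i
--             while j < n and not ('a' <= text[j] <= 'z'):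
--                 if 'A' <= text[j] <= 'Z':
--                     caps.append(text[j])
--                 j += 1
--             if len(caps) > 2:
--                 result.append(''.join(caps[:-2]))
--             i = j + 2
--         else:
--             i += 1
--     return result
-- ===== Notes on version B (the rewrite author's own statement) =====
-- stated objective: alternative
-- what changed: Replaced A's per-character state machine (prev/prev_prev lookbehind, growing 'word' buffer, membership tests against explicit 26-element letter lists) by a window scan that finds each run start (a capital preceded by two lowercase letters), consumes the whole capital run in one inner loop, and emits the fragment at once; letter tests are code-point range comparisons.
import Mathlib
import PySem

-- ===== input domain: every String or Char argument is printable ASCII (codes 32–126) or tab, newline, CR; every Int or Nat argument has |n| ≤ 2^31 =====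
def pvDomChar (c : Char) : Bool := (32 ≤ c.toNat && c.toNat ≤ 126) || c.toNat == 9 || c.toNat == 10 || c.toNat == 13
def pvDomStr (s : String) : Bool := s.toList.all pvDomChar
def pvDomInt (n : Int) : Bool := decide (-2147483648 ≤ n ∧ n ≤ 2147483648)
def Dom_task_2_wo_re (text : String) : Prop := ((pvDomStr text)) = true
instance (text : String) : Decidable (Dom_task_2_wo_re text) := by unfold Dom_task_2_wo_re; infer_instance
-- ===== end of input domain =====

-- B replaces A's per-character prev/prev_prev state machine by a window scan that finds each
-- run start (capital preceded by two lowercase) and consumes the whole capital run at once;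
-- objective: alternative (pattern-matching scan instead of a state machine).

-- ===== PORT A =====
-- lowercase_letters / capital_letters: the explicit 26-element lists A builds
def pvLowercaseLetters : List Char := (List.range 26).map (fun i => Char.ofNat (97 + i))
def pvCapitalLetters : List Char := (List.range 26).map (fun i => Char.ofNat (65 + i))

-- prev_ch / prev_prev_ch start as "" and then hold one char: Option Char (none = "");
-- '"" in lowercase_letters' is False, a 1-char string is in the list iff its char is.
def pvOptIn (o : Option Char) (l : List Char) : Bool :=
  match o with
  | none => false
  | some c => l.contains c

-- state: (result, prev_prev_ch, prev_ch, word); word[:-2] = dropLast.dropLast (exact for str[:-2])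
def pvStepA (st : List (List Char) × Option Char × Option Char × List Char) (ch : Char) :
    List (List Char) × Option Char × Option Char × List Char :=
  let res := st.1
  let prev_prev := st.2.1
  let prev := st.2.2.1
  let word := st.2.2.2
  if pvLowercaseLetters.contains ch then
    ((if word.length > 2 then res ++ [word.dropLast.dropLast] else res), prev, some ch, [])
  else if pvCapitalLetters.contains ch &&
      ((pvOptIn prev pvLowercaseLetters && pvOptIn prev_prev pvLowercaseLetters) || word.length > 0) then
    (res, prev, some ch, word ++ [ch])
  else
    (res, prev, some ch, word)

def task_2_wo_re (text : String) : List String :=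
  let st := text.toList.foldl pvStepA ([], none, none, [])
  (if st.2.2.2.length > 2 then st.1 ++ [st.2.2.2.dropLast.dropLast] else st.1).map String.mk

-- ===== PORT B =====
-- 'a' <= c <= 'z' compares code points in Python: 97 ≤ c.toNat ≤ 122 (exactly)
def pvIsLower (c : Char) : Bool := decide (97 ≤ c.toNat) && decide (c.toNat ≤ 122)
def pvIsUpper (c : Char) : Bool := decide (65 ≤ c.toNat) && decide (c.toNat ≤ 90)

-- Source B's inner while loop: collect the capitals up to (excluding) the first lowercase;
-- returns (caps, the remaining text from that lowercase on)
def pvCollect : List Char → List Char × List Char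
  | [] => ([], [])
  | x :: xs =>
      if pvIsLower x then ([], x :: xs)
      else
        let p := pvCollect xs
        (if pvIsUpper x then x :: p.1 else p.1, p.2)

theorem pvCollect_snd_length (cs : List Char) : (pvCollect cs).2.length ≤ cs.length := by
  induction cs with
  | nil => simp [pvCollect]
  | cons x xs ih =>
      simp only [pvCollect]
      split
      · simp
      · simpa using Nat.le_succ_of_le ih

-- Source B's outer while loop over the window (text[i-2], text[i-1], text[i]); after a run ending
-- at index j it resumes with i = j + 2, i.e. with the window at the list starting at j.
def pvGo : List Char → List String
  | a :: b :: c :: rest =>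
      if pvIsLower a && pvIsLower b && pvIsUpper c then
        let p := pvCollect (c :: rest)
        (if p.1.length > 2 then [String.mk p.1.dropLast.dropLast] else []) ++ pvGo p.2
      else pvGo (b :: c :: rest)
  | _ => []
termination_by cs => cs.length
decreasing_by
  · have h := pvCollect_snd_length (c :: rest)
    simp at h ⊢; omega
  · simp

def task_2_wo_re_alt (text : String) : List String := pvGo text.toList

-- ===== PRECONDITION & SPEC =====
def Spec_task_2_wo_re (text : String) (out : List String) : Prop := out = task_2_wo_re_alt text
instance (text : String) (out : List String) : Decidable (Spec_task_2_wo_re text out) := by unfold Spec_task_2_wo_re; infer_instance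

-- ===== CLAIM (what is proved, stated in full; the proofs are below) =====
def Claim_equal_task_2_wo_re : Prop := ∀ (text : String), Dom_task_2_wo_re text → Spec_task_2_wo_re text (task_2_wo_re text)

-- ===== LEMMAS AND PROOFS =====

-- membership in A's explicit letter lists is the code-point range test B uses
theorem pvContains_lower (c : Char) : pvLowercaseLetters.contains c = pvIsLower c := by
  rw [Bool.eq_iff_iff]
  simp only [pvLowercaseLetters, pvIsLower, List.contains_iff_mem, List.mem_map, List.mem_range,
    Bool.and_eq_true, decide_eq_true_eq]
  constructor
  · rintro ⟨i, hi, rfl⟩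
    have h : (Char.ofNat (97 + i)).toNat = 97 + i := by
      rw [Char.toNat_ofNat, if_pos (Or.inl (by omega))]
    omega
  · rintro ⟨h1, h2⟩
    refine ⟨c.toNat - 97, by omega, ?_⟩
    have h : 97 + (c.toNat - 97) = c.toNat := by omega
    rw [h, Char.ofNat_toNat]

theorem pvContains_upper (c : Char) : pvCapitalLetters.contains c = pvIsUpper c := by
  rw [Bool.eq_iff_iff]
  simp only [pvCapitalLetters, pvIsUpper, List.contains_iff_mem, List.mem_map, List.mem_range,
    Bool.and_eq_true, decide_eq_true_eq]
  constructor
  · rintro ⟨i, hi, rfl⟩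
    have h : (Char.ofNat (65 + i)).toNat = 65 + i := by
      rw [Char.toNat_ofNat, if_pos (Or.inl (by omega))]
    omega
  · rintro ⟨h1, h2⟩
    refine ⟨c.toNat - 65, by omega, ?_⟩
    have h : 65 + (c.toNat - 65) = c.toNat := by omega
    rw [h, Char.ofNat_toNat]

theorem pvLower_not_upper (c : Char) (h : pvIsLower c = true) : pvIsUpper c = false := by
  simp only [pvIsLower, Bool.and_eq_true, decide_eq_true_eq] at h
  unfold pvIsUpper
  have h90 : decide (c.toNat ≤ 90) = false := by simp; omega
  rw [h90, Bool.and_false]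

-- the flushed fragment
def pvFlushS (w : List Char) : List String :=
  if w.length > 2 then [String.mk w.dropLast.dropLast] else []

-- A's machine, written recursively: pvF = idle state (word = "") carrying the last ≤2 chars;
-- pvG = word state (word = w ≠ "", p = last char seen)
def pvPush (lb : List Char) (ch : Char) : List Char :=
  if lb.length < 2 then lb ++ [ch] else lb.tail ++ [ch]

def pvStart (lb : List Char) : Bool :=
  match lb with
  | [a, b] => pvIsLower a && pvIsLower b
  | _ => false

mutual
def pvF : List Char → List Char → List String
  | _, [] => []
  | lb, ch :: cs =>
      if pvIsLower ch then pvF (pvPush lb ch) cs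
      else if pvIsUpper ch && pvStart lb then pvG ch [ch] cs
      else pvF (pvPush lb ch) cs

def pvG : Char → List Char → List Char → List String
  | _, w, [] => pvFlushS w
  | p, w, ch :: cs =>
      if pvIsLower ch then pvFlushS w ++ pvF [p, ch] cs
      else if pvIsUpper ch then pvG ch (w ++ [ch]) cs
      else pvG ch w cs
end

def pvLbOf (pp p : Option Char) : List Char :=
  (pp.toList) ++ (p.toList)

def pvFinish (st : List (List Char) × Option Char × Option Char × List Char) : List String :=
  (if st.2.2.2.length > 2 then st.1 ++ [st.2.2.2.dropLast.dropLast] else st.1).map String.mk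

theorem pvPush_lbOf (pp p : Option Char) (ch : Char) (h : pp.isSome → p.isSome) :
    pvPush (pvLbOf pp p) ch = pvLbOf p (some ch) := by
  cases pp <;> cases p <;> simp_all [pvPush, pvLbOf]

theorem pvPush_length (lb : List Char) (ch : Char) (h : lb.length ≤ 2) :
    (pvPush lb ch).length ≤ 2 := by
  unfold pvPush
  split
  · simp; omega
  · cases lb <;> simp_all

-- A's lookbehind test equals B's window-start test
theorem pvDecideMem_lower (c : Char) : decide (c ∈ pvLowercaseLetters) = pvIsLower c := by
  rw [← pvContains_lower]
  rw [Bool.eq_iff_iff]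
  simp [List.contains_iff_mem]

theorem pvOptIn_pair (pp p : Option Char) :
    (pvOptIn p pvLowercaseLetters && pvOptIn pp pvLowercaseLetters) = pvStart (pvLbOf pp p) := by
  cases pp <;> cases p <;>
    simp [pvOptIn, pvStart, pvLbOf, pvContains_lower, pvDecideMem_lower, Bool.and_comm]

-- A's foldl equals the recursive machine (joint statement for the two states)
theorem pvFoldA (cs : List Char) :
    (∀ (res : List (List Char)) (pp p : Option Char), (pp.isSome → p.isSome) →
      pvFinish (cs.foldl pvStepA (res, pp, p, [])) = res.map String.mk ++ pvF (pvLbOf pp p) cs) ∧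
    (∀ (res : List (List Char)) (pp : Option Char) (p : Char) (w : List Char), w ≠ [] →
      pvFinish (cs.foldl pvStepA (res, pp, some p, w)) = res.map String.mk ++ pvG p w cs) := by
  induction cs with
  | nil =>
    refine ⟨fun res pp p _ => ?_, fun res pp p w hw => ?_⟩
    · simp [pvF, pvFinish]
    · simp only [List.foldl_nil, pvG, pvFinish, pvFlushS]
      split <;> simp
  | cons ch cs ih =>
    refine ⟨fun res pp p hps => ?_, fun res pp p w hw => ?_⟩
    · rw [List.foldl_cons]
      by_cases hl : pvIsLower ch = true
      · have hstep : pvStepA (res, pp, p, []) ch = (res, p, some ch, []) := by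
          simp only [pvStepA]
          rw [pvContains_lower, if_pos hl]
          simp
        rw [hstep, (ih).1 res p (some ch) (fun _ => rfl)]
        have hF : pvF (pvLbOf pp p) (ch :: cs) = pvF (pvLbOf p (some ch)) cs := by
          rw [← pvPush_lbOf pp p ch hps]
          simp only [pvF]
          rw [if_pos hl]
        rw [hF]
      · by_cases hu : (pvIsUpper ch && pvStart (pvLbOf pp p)) = true
        · have hu' := hu
          rw [Bool.and_eq_true] at hu'
          obtain ⟨hup, hst⟩ := hu'
          have hpair : (pvOptIn p pvLowercaseLetters && pvOptIn pp pvLowercaseLetters) = true := by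
            rw [pvOptIn_pair]; exact hst
          have hstep : pvStepA (res, pp, p, []) ch = (res, p, some ch, [ch]) := by
            simp only [pvStepA]
            rw [pvContains_lower, pvContains_upper]
            rw [if_neg hl, if_pos (by simp [hup, hpair])]
            simp
          rw [hstep, (ih).2 res p ch [ch] (by simp)]
          have hF : pvF (pvLbOf pp p) (ch :: cs) = pvG ch [ch] cs := by
            simp only [pvF]
            rw [if_neg hl, if_pos hu]
          rw [hF]
        · have hstep : pvStepA (res, pp, p, []) ch = (res, p, some ch, []) := by
            simp only [pvStepA]
            rw [pvContains_lower, pvContains_upper, pvOptIn_pair]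
            rw [if_neg hl, if_neg (fun h => hu (by simpa using h))]
          rw [hstep, (ih).1 res p (some ch) (fun _ => rfl)]
          have hF : pvF (pvLbOf pp p) (ch :: cs) = pvF (pvLbOf p (some ch)) cs := by
            rw [← pvPush_lbOf pp p ch hps]
            simp only [pvF]
            rw [if_neg hl, if_neg hu]
          rw [hF]
    · rw [List.foldl_cons]
      have hw' : 0 < w.length := List.length_pos_of_ne_nil hw
      by_cases hl : pvIsLower ch = true
      · have hstep : pvStepA (res, pp, some p, w) ch =
            ((if w.length > 2 then res ++ [w.dropLast.dropLast] else res), some p, some ch, []) := by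
          simp only [pvStepA]
          rw [pvContains_lower, if_pos hl]
        rw [hstep, (ih).1 _ (some p) (some ch) (fun _ => rfl)]
        have hG : pvG p w (ch :: cs) = pvFlushS w ++ pvF [p, ch] cs := by
          simp only [pvG]
          rw [if_pos hl]
        rw [hG]
        rw [show pvLbOf (some p) (some ch) = [p, ch] from rfl]
        unfold pvFlushS
        split <;> simp
      · by_cases hu : pvIsUpper ch = true
        · have hstep : pvStepA (res, pp, some p, w) ch = (res, some p, some ch, w ++ [ch]) := by
            simp only [pvStepA]
            rw [pvContains_lower, pvContains_upper]
            rw [if_neg hl, if_pos (by simp [hu, hw'])]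
          rw [hstep, (ih).2 res (some p) ch (w ++ [ch]) (by simp)]
          have hG : pvG p w (ch :: cs) = pvG ch (w ++ [ch]) cs := by
            simp only [pvG]
            rw [if_neg hl, if_pos hu]
          rw [hG]
        · have hstep : pvStepA (res, pp, some p, w) ch = (res, some p, some ch, w) := by
            simp only [pvStepA]
            rw [pvContains_lower, pvContains_upper]
            rw [if_neg hl, if_neg (by simp [hu])]
          rw [hstep, (ih).2 res (some p) ch w hw]
          have hG : pvG p w (ch :: cs) = pvG ch w cs := by
            simp only [pvG]
            rw [if_neg hl, if_neg hu]
          rw [hG]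

theorem pvGo_cons_nonlower (p : Char) (cs : List Char) (hp : pvIsLower p = false) :
    pvGo (p :: cs) = pvGo cs := by
  match cs with
  | [] => simp [pvGo]
  | [x] => simp [pvGo]
  | x :: y :: ys => rw [pvGo]; simp [hp]

-- B's window scan equals the recursive machine
theorem pvGoFG (n : Nat) : ∀ (cs : List Char), cs.length = n →
    (∀ (lb : List Char), lb.length ≤ 2 → pvF lb cs = pvGo (lb ++ cs)) ∧
    (∀ (p : Char) (w : List Char), w ≠ [] → pvIsLower p = false →
      pvG p w cs = pvFlushS (w ++ (pvCollect cs).1) ++ pvGo (pvCollect cs).2) := by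
  induction n using Nat.strong_induction_on with
  | _ n ih =>
    intro cs hcs
    constructor
    · intro lb hlb
      match cs with
      | [] =>
        match lb, hlb with
        | [], _ => simp [pvF, pvGo]
        | [a], _ => simp [pvF, pvGo]
        | [a, b], _ => simp [pvF, pvGo]
      | ch :: cs' =>
        have hlen : cs'.length < n := by simp at hcs; omega
        by_cases hl : pvIsLower ch = true
        · have hF : pvF lb (ch :: cs') = pvF (pvPush lb ch) cs' := by
            simp only [pvF]
            rw [if_pos hl]
          rw [hF, (ih cs'.length hlen cs' rfl).1 (pvPush lb ch) (pvPush_length lb ch hlb)]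
          match lb, hlb with
          | [], _ => simp [pvPush]
          | [a], _ => simp [pvPush]
          | [a, b], _ =>
            rw [show pvPush [a, b] ch = [b, ch] from rfl,
              show ([a, b] : List Char) ++ ch :: cs' = a :: b :: ch :: cs' from rfl]
            have hgo : pvGo (a :: b :: ch :: cs') = pvGo (b :: ch :: cs') := by
              rw [pvGo]
              rw [if_neg (by simp [pvLower_not_upper ch hl])]
            rw [hgo]
            rfl
        · by_cases hu : (pvIsUpper ch && pvStart lb) = true
          · have hu' := hu
            rw [Bool.and_eq_true] at hu'
            obtain ⟨hup, hst⟩ := hu'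
            obtain ⟨a, b, rfl, ha, hb⟩ :
                ∃ a b, lb = [a, b] ∧ pvIsLower a = true ∧ pvIsLower b = true := by
              cases lb with
              | nil => simp [pvStart] at hst
              | cons a t =>
                cases t with
                | nil => simp [pvStart] at hst
                | cons b t2 =>
                  cases t2 with
                  | nil =>
                    simp only [pvStart, Bool.and_eq_true] at hst
                    exact ⟨a, b, rfl, hst.1, hst.2⟩
                  | cons c t3 => simp [pvStart] at hst
            have hF : pvF [a, b] (ch :: cs') = pvG ch [ch] cs' := by
              simp only [pvF]
              rw [if_neg hl, if_pos hu]
            rw [hF, (ih cs'.length hlen cs' rfl).2 ch [ch] (by simp) (by simpa using hl)]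
            have hcol : pvCollect (ch :: cs') = (ch :: (pvCollect cs').1, (pvCollect cs').2) := by
              simp only [pvCollect]
              rw [if_neg hl, if_pos hup]
            rw [show ([a, b] : List Char) ++ ch :: cs' = a :: b :: ch :: cs' from rfl, pvGo]
            rw [if_pos (by simp [ha, hb, hup]), hcol]
            simp [pvFlushS]
          · have hF : pvF lb (ch :: cs') = pvF (pvPush lb ch) cs' := by
              simp only [pvF]
              rw [if_neg hl, if_neg hu]
            rw [hF, (ih cs'.length hlen cs' rfl).1 (pvPush lb ch) (pvPush_length lb ch hlb)]
            match lb, hlb with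
            | [], _ => simp [pvPush]
            | [a], _ => simp [pvPush]
            | [a, b], _ =>
              rw [show pvPush [a, b] ch = [b, ch] from rfl,
                show ([a, b] : List Char) ++ ch :: cs' = a :: b :: ch :: cs' from rfl]
              have hgo : pvGo (a :: b :: ch :: cs') = pvGo (b :: ch :: cs') := by
                rw [pvGo]
                rw [if_neg (by
                  intro hcond
                  rw [Bool.and_eq_true, Bool.and_eq_true] at hcond
                  obtain ⟨⟨ha, hb⟩, hup⟩ := hcond
                  exact hu (by rw [Bool.and_eq_true]
                               exact ⟨hup, by simp [pvStart, ha, hb]⟩))]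
              rw [hgo]
              rfl
    · intro p w hw hp
      match cs with
      | [] => simp [pvG, pvCollect, pvGo]
      | ch :: cs' =>
        have hlen : cs'.length < n := by simp at hcs; omega
        by_cases hl : pvIsLower ch = true
        · have hG : pvG p w (ch :: cs') = pvFlushS w ++ pvF [p, ch] cs' := by
            simp only [pvG]
            rw [if_pos hl]
          rw [hG, (ih cs'.length hlen cs' rfl).1 [p, ch] (by simp)]
          rw [show ([p, ch] : List Char) ++ cs' = p :: ch :: cs' from rfl]
          rw [pvGo_cons_nonlower p (ch :: cs') hp]
          have hcol : pvCollect (ch :: cs') = ([], ch :: cs') := by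
            simp only [pvCollect]
            rw [if_pos hl]
          rw [hcol]
          simp
        · by_cases hu : pvIsUpper ch = true
          · have hG : pvG p w (ch :: cs') = pvG ch (w ++ [ch]) cs' := by
              simp only [pvG]
              rw [if_neg hl, if_pos hu]
            rw [hG, (ih cs'.length hlen cs' rfl).2 ch (w ++ [ch]) (by simp) (by simpa using hl)]
            have hcol : pvCollect (ch :: cs') = (ch :: (pvCollect cs').1, (pvCollect cs').2) := by
              simp only [pvCollect]
              rw [if_neg hl, if_pos hu]
            rw [hcol]
            simp
          · have hG : pvG p w (ch :: cs') = pvG ch w cs' := by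
              simp only [pvG]
              rw [if_neg hl, if_neg hu]
            rw [hG, (ih cs'.length hlen cs' rfl).2 ch w hw (by simpa using hl)]
            have hcol : pvCollect (ch :: cs') = ((pvCollect cs').1, (pvCollect cs').2) := by
              simp only [pvCollect]
              rw [if_neg hl, if_neg (by simp [hu])]
            rw [hcol]

-- ===== VERDICT (by name: the statement is the Claim_ definition above) =====
theorem task_2_wo_re_spec : Claim_equal_task_2_wo_re := by
  intro text _
  unfold Spec_task_2_wo_re task_2_wo_re task_2_wo_re_alt
  have hA := (pvFoldA text.toList).1 [] none none (by simp)
  have hB := ((pvGoFG text.toList.length) text.toList rfl).1 [] (by simp)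
  simp [pvFinish, pvLbOf] at hA hB
  simp [hA, hB]
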